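-- pv_equiv track=rewrite | github.com/malpern/zmk-to-kanata | converter/parser/macro_parser.py | _extract_behaviors_after_control
-- ===== SOURCE A (Python) =====
-- from typing import Dict, List, Optional, Tuple
--
-- def _extract_behaviors_after_control(part: str, control: str) -> List[str]:
--     """Extract behaviors after a macro control behavior."""
--     # Remove the control part
--     behaviors_str = part.replace(control, "").strip()
--
--     # Process the behaviors
--     result = []
--     current_behavior = None
--
--     # Split by whitespace to get individual tokens
--     tokens = behaviors_str.split()
--
--     i = 0
--     while i < len(tokens):
--         if tokens[i].startswith("&"):
--             # This is a behavior
--             current_behavior = tokens[i]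
--
--             # Check if there's a parameter
--             if i + 1 < len(tokens) and not tokens[i + 1].startswith("&"):
--                 # This is a parameter
--                 result.append(f"{current_behavior} {tokens[i + 1]}")
--                 i += 2
--             else:
--                 # No parameter
--                 result.append(current_behavior)
--                 i += 1
--         else:
--             # Skip unexpected tokens
--             i += 1
--
--     return result
-- ===== SOURCE B (Python) =====
-- from typing import List
--
--
-- def _extract_behaviors_after_control(part: str, control: str) -> List[str]:
--     """Extract behaviors after a macro control behavior."""
--     tokens = part.replace(control, "").strip().split()
--     result: List[str] = []
--     pending = None  # last behavior token not yet emitted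
--     for token in tokens:
--         if token.startswith("&"):
--             if pending is not None:
--                 result.append(pending)
--             pending = token
--         elif pending is not None:
--             result.append(f"{pending} {token}")
--             pending = None
--         # non-'&' token with no pending behavior: skip
--     if pending is not None:
--         result.append(pending)
--     return result
-- ===== Notes on version B (the rewrite author's own statement) =====
-- stated objective: simpler
-- what changed: Replaces the index-based while-loop with lookahead (i+1 peek, i += 1/2) by a single for-loop over the tokens that keeps a 'pending' behavior and flushes it when the next behavior or a parameter arrives, plus a final flush.
import Mathlib
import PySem

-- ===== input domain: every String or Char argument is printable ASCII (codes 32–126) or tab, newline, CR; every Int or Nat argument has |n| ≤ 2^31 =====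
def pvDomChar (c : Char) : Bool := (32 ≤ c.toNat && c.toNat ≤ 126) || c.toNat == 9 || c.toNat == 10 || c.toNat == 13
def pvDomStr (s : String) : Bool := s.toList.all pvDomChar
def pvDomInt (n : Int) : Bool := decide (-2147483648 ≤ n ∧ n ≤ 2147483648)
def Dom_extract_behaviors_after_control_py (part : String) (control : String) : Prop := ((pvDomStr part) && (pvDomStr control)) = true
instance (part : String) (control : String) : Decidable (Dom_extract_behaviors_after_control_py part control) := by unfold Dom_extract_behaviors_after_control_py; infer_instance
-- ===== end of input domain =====

-- B replaces A's index-based while-loop with lookahead by a single pass keeping a pending behavior; simpler decomposition, same cost.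

-- ===== PORT A =====
-- A's while-loop over the token list: at a '&' token it peeks at the next
-- token (i+1) and advances by 2 (pair) or 1; at other tokens it advances by 1.
def extractA_loop : List String → List String
  | [] => []
  | [t] => if PySem.Str.startswith t "&" then [t] else []
  | t :: u :: rest =>
    if PySem.Str.startswith t "&" then
      if ¬ PySem.Str.startswith u "&" then
        (t ++ " " ++ u) :: extractA_loop rest
      else
        t :: extractA_loop (u :: rest)
    else
      extractA_loop (u :: rest)

def extract_behaviors_after_control_py (part : String) (control : String) : List String :=
  let behaviors_str := PySem.Str.strip (PySem.Str.replace part control "")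
  let tokens := PySem.Str.split₀ behaviors_str
  extractA_loop tokens

-- ===== PORT B =====
-- B's final flush of the loop state.
def extractB_finish (st : List String × Option String) : List String :=
  match st.2 with
  | some p => st.1 ++ [p]
  | none => st.1

-- B's for-loop body: state is (result so far, pending behavior).
def extractB_step (st : List String × Option String) (token : String) : List String × Option String :=
  if PySem.Str.startswith token "&" then
    (match st.2 with
     | some p => (st.1 ++ [p], some token)
     | none => (st.1, some token))
  else
    match st.2 with
    | some p => (st.1 ++ [p ++ " " ++ token], none)
    | none => st

def extract_behaviors_after_control_py_alt (part : String) (control : String) : List String :=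
  let tokens := PySem.Str.split₀ (PySem.Str.strip (PySem.Str.replace part control ""))
  extractB_finish (tokens.foldl extractB_step ([], none))

-- ===== PRECONDITION & SPEC =====
def Spec_extract_behaviors_after_control_py (part : String) (control : String) (out : List String) : Prop := out = extract_behaviors_after_control_py_alt part control
instance (part : String) (control : String) (out : List String) : Decidable (Spec_extract_behaviors_after_control_py part control out) := by unfold Spec_extract_behaviors_after_control_py; infer_instance

-- ===== CLAIM (what is proved, stated in full; the proofs are below) =====
def Claim_equal_extract_behaviors_after_control_py : Prop := ∀ (part : String) (control : String), Dom_extract_behaviors_after_control_py part control → Spec_extract_behaviors_after_control_py part control (extract_behaviors_after_control_py part control)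

-- ===== LEMMAS AND PROOFS =====

-- The accumulator of B's fold factors out as a prefix.
theorem extractB_foldl_acc (ts : List String) : ∀ (acc : List String) (p : Option String),
    ts.foldl extractB_step (acc, p) =
      (acc ++ (ts.foldl extractB_step ([], p)).1, (ts.foldl extractB_step ([], p)).2) := by
  induction ts with
  | nil => intro acc p; simp
  | cons t ts ih =>
    intro acc p
    simp only [List.foldl_cons]
    rw [ih (extractB_step (acc, p) t).1 (extractB_step (acc, p) t).2,
        ih (extractB_step ([], p) t).1 (extractB_step ([], p) t).2]
    unfold extractB_step
    split_ifs with h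
    · cases p <;> simp
    · cases p <;> simp

-- Core invariant: B's fold starting from pending p computes what A's loop
-- computes on the tokens with the pending behavior (a '&'-token) prepended.
theorem extractB_eq_loop (ts : List String) :
    ∀ (p : Option String), (∀ q, p = some q → PySem.Str.startswith q "&" = true) →
      extractB_finish (ts.foldl extractB_step ([], p)) =
        (match p with
         | some q => extractA_loop (q :: ts)
         | none => extractA_loop ts) := by
  induction ts with
  | nil =>
    intro p hp
    cases p with
    | none => rfl
    | some q =>
      have hq' : PySem.Chars.startswith q.toList ['&'] = true := by
        simpa using hp q rfl
      simp only [List.foldl_nil]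
      simp [extractB_finish, extractA_loop, hq']
  | cons t ts ih =>
    intro p hp
    simp only [List.foldl_cons]
    by_cases ht : PySem.Str.startswith t "&" = true
    · have ht' : PySem.Chars.startswith t.toList ['&'] = true := by simpa using ht
      cases p with
      | none =>
        have hstep : extractB_step ([], none) t = ([], some t) := by
          simp [extractB_step, ht']
        rw [hstep, ih (some t) (by intro q hq; cases hq; exact ht)]
      | some q =>
        have hq := hp q rfl
        have hq' : PySem.Chars.startswith q.toList ['&'] = true := by simpa using hq
        have hstep : extractB_step ([], some q) t = ([q], some t) := by
          simp [extractB_step, ht']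
        rw [hstep, extractB_foldl_acc ts [q] (some t)]
        have ihts := ih (some t) (by intro r hr; cases hr; exact ht)
        simp only at ihts
        have hfl : extractB_finish ([q] ++ (ts.foldl extractB_step ([], some t)).1,
            (ts.foldl extractB_step ([], some t)).2) =
            [q] ++ extractB_finish (ts.foldl extractB_step ([], some t)) := by
          unfold extractB_finish
          cases (ts.foldl extractB_step ([], some t)).2 <;> simp
        rw [hfl, ihts]
        simp [extractA_loop, hq', ht']
    · have ht' : PySem.Chars.startswith t.toList ['&'] = false := by
        simpa using ht
      cases p with
      | none =>
        have hstep : extractB_step ([], none) t = ([], none) := by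
          simp [extractB_step, ht']
        rw [hstep, ih none (by intro q hq; cases hq)]
        cases ts with
        | nil => simp [extractA_loop, ht']
        | cons u us => simp [extractA_loop, ht']
      | some q =>
        have hq := hp q rfl
        have hq' : PySem.Chars.startswith q.toList ['&'] = true := by simpa using hq
        have hstep : extractB_step ([], some q) t = ([q ++ " " ++ t], none) := by
          simp [extractB_step, ht']
        rw [hstep, extractB_foldl_acc ts [q ++ " " ++ t] none]
        have ihts := ih none (by intro r hr; cases hr)
        simp only at ihts
        have hfl : extractB_finish ([q ++ " " ++ t] ++ (ts.foldl extractB_step ([], none)).1,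
            (ts.foldl extractB_step ([], none)).2) =
            [q ++ " " ++ t] ++ extractB_finish (ts.foldl extractB_step ([], none)) := by
          unfold extractB_finish
          cases (ts.foldl extractB_step ([], none)).2 <;> simp
        rw [hfl, ihts]
        simp [extractA_loop, hq', ht']

-- ===== VERDICT (by name: the statement is the Claim_ definition above) =====
theorem extract_behaviors_after_control_py_spec : Claim_equal_extract_behaviors_after_control_py := by
  intro part control _
  unfold Spec_extract_behaviors_after_control_py
  unfold extract_behaviors_after_control_py extract_behaviors_after_control_py_alt
  exact (extractB_eq_loop
    (PySem.Str.split₀ (PySem.Str.strip (PySem.Str.replace part control ""))) none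
    (by intro q hq; cases hq)).symm
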